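-- pv_equiv track=rewrite | github.com/ARULGNANAKUMAR/ARUL-GNANAKUMAR | p2.py | count_frogs_between_stones
-- ===== SOURCE A (Python) =====
-- def preprocess(s):
--     n = len(s)
--
--
--     prefix_frogs = [0] * (n + 1)
--     left_stone = [-1] * n
--     right_stone = [-1] * n
--
--
--     last_stone = -1
--     for i in range(n):
--         if s[i] == '|':
--             last_stone = i
--         left_stone[i] = last_stone
--         prefix_frogs[i + 1] = prefix_frogs[i] + (1 if s[i] == '*' else 0)
--
--
--     last_stone = -1
--     for i in range(n - 1, -1, -1):
--         if s[i] == '|':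
--             last_stone = i
--         right_stone[i] = last_stone
--
--     return prefix_frogs, left_stone, right_stone
--
-- def count_frogs_between_stones(s, startIndex, endIndex):
--
--     prefix_frogs, left_stone, right_stone = preprocess(s)
--
--     result = []
--
--     for start, end in zip(startIndex, endIndex):
--         start -= 1
--         end -= 1
--
--
--         left_boundary = right_stone[start]
--
--         right_boundary = left_stone[end]
--
--
--         if left_boundary != -1 and right_boundary != -1 and left_boundary < right_boundary:
--             frogs_between = prefix_frogs[right_boundary + 1] - prefix_frogs[left_boundary + 1]
--             result.append(frogs_between)
--         else:
--             result.append(0)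
--
--     return result
-- ===== SOURCE B (Python) =====
-- # Per-query recomputation from stone/frog position lists instead of
-- # precomputed prefix/nearest-stone arrays; query indices are validated as
-- # 1-based positions in s.
-- def count_frogs_between_stones(s, startIndex, endIndex):
--     stones = [i for i, c in enumerate(s) if c == '|']
--     frogs = [i for i, c in enumerate(s) if c == '*']
--
--     def query(a, b):
--         if not (1 <= a <= len(s) and 1 <= b <= len(s)):
--             raise ValueError("query indices must be 1-based positions in s")
--         inner = [i for i in stones if a - 1 <= i <= b - 1]
--         if len(inner) < 2:
--             return 0
--         return sum(1 for f in frogs if inner[0] < f < inner[-1])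
--
--     return [query(a, b) for a, b in zip(startIndex, endIndex)]
-- ===== Notes on version B (the rewrite author's own statement) =====
-- stated objective: simpler
-- what changed: Drops A's three precomputed arrays (prefix frog counts, nearest-stone-left, nearest-stone-right) and answers each query directly from the stone/frog position lists (bounding stones = first/last stone in the queried window, answer = frogs strictly between them); Pre_ restricts queries to the natural 1-based domain 1 <= index <= len(s), excluding inputs on which A raises IndexError or reads its arrays through Python's accidental negative-index wraparound (B validates its indices and raises ValueError there).
-- outside the precondition, e.g. on count_frogs_between_stones('|*|', [0], [3]): A returns [0], B raises ValueError; on count_frogs_between_stones('*', [2], [1]): A raises IndexError, B raises ValueError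
import Mathlib
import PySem

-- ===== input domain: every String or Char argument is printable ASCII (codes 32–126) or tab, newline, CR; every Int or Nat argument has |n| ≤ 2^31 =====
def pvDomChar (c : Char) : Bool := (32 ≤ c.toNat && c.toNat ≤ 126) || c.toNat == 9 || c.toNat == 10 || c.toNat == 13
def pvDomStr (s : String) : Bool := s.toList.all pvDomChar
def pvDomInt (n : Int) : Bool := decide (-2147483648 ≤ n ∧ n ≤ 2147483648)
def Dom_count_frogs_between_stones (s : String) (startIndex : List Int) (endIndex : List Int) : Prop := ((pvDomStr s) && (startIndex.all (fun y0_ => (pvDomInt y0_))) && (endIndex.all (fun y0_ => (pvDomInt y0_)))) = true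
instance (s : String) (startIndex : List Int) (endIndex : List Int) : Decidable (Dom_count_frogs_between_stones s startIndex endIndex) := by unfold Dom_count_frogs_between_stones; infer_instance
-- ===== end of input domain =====

-- B answers each query directly from stone/frog position lists instead of A's three precomputed arrays (simpler, no preprocessing).

-- ===== PORT A =====
-- first forward pass of preprocess: builds prefix_frogs (threading the running count cnt) and left_stone, threading last_stone
def pvLoop1 : List Char → Int → Int → Int → List Int → List Int → List Int × List Int
  | [], _, _, _, pf, ls => (pf, ls)
  | c :: rest, i, last, cnt, pf, ls =>
    let last' := if c = '|' then i else last
    let cnt' := cnt + (if c = '*' then 1 else 0)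
    pvLoop1 rest (i + 1) last' cnt' (pf ++ [cnt']) (ls ++ [last'])

-- second (backward) pass of preprocess: builds right_stone, iterating over the reversed string with descending index i
def pvLoop2 : List Char → Int → Int → List Int → List Int
  | [], _, _, rs => rs
  | c :: rest, i, last, rs =>
    let last' := if c = '|' then i else last
    pvLoop2 rest (i - 1) last' (last' :: rs)

def pvPreprocess (cs : List Char) : List Int × List Int × List Int :=
  let (pf, ls) := pvLoop1 cs 0 (-1) 0 [0] []
  let rs := pvLoop2 cs.reverse ((cs.length : Int) - 1) (-1) []
  (pf, ls, rs)

-- the query loop; `none` is exactly Python's IndexError on right_stone[start] / left_stone[end]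
def pvQueryLoop (pf ls rs : List Int) : List (Int × Int) → List Int → Option (List Int)
  | [], acc => some acc
  | (a, b) :: rest, acc =>
    match PySem.List.pyGet? rs (a - 1) with
    | none => none
    | some lb =>
      match PySem.List.pyGet? ls (b - 1) with
      | none => none
      | some rb =>
        let v : Int := if lb ≠ -1 ∧ rb ≠ -1 ∧ lb < rb
                       then PySem.List.pyGetD pf (rb + 1) 0 - PySem.List.pyGetD pf (lb + 1) 0
                       else 0
        pvQueryLoop pf ls rs rest (acc ++ [v])

def count_frogs_between_stones (s : String) (startIndex : List Int) (endIndex : List Int) : List Int :=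
  let p := pvPreprocess s.toList
  (pvQueryLoop p.1 p.2.1 p.2.2 (startIndex.zip endIndex) []).getD []

-- ===== PORT B =====
-- [i for i, c in enumerate(s) if c == '|'] and the same for '*'
def pvStones (cs : List Char) : List Int := ((PySem.List.enumerate cs 0).filter (fun p => p.2 == '|')).map (fun p => p.1)
def pvFrogs (cs : List Char) : List Int := ((PySem.List.enumerate cs 0).filter (fun p => p.2 == '*')).map (fun p => p.1)

-- the list comprehension over zip, with query(a, b) inlined; `none` is B's ValueError
def pvQueryB (stones frogs : List Int) (n : Int) : List (Int × Int) → Option (List Int)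
  | [] => some []
  | (a, b) :: rest =>
    if 1 ≤ a ∧ a ≤ n ∧ 1 ≤ b ∧ b ≤ n then
      let inner := stones.filter (fun i => decide (a - 1 ≤ i) && decide (i ≤ b - 1))
      let v : Int := if inner.length < 2 then 0
        else ((frogs.filter (fun f => decide (inner.headD 0 < f) && decide (f < inner.getLastD 0))).length : Int)
      -- inner[0] / inner[-1]: headD/getLastD are exact here, the branch guarantees inner ≠ []
      (pvQueryB stones frogs n rest).map (fun t => v :: t)
    else none

def count_frogs_between_stones_alt (s : String) (startIndex : List Int) (endIndex : List Int) : List Int :=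
  (pvQueryB (pvStones s.toList) (pvFrogs s.toList) (s.toList.length : Int) (startIndex.zip endIndex)).getD []

-- ===== PRECONDITION & SPEC =====
-- Pre_ restricts the zipped queries to the natural 1-based domain 1 ≤ index ≤ len(s):
-- outside it A either raises IndexError (index beyond [1-n, n]) or reads its arrays
-- through Python's negative-index wraparound, an accident of its implementation.
def Pre_count_frogs_between_stones (s : String) (startIndex : List Int) (endIndex : List Int) : Prop :=
  ∀ p ∈ startIndex.zip endIndex,
    1 ≤ p.1 ∧ p.1 ≤ (s.toList.length : Int) ∧ 1 ≤ p.2 ∧ p.2 ≤ (s.toList.length : Int)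
instance (s : String) (startIndex : List Int) (endIndex : List Int) : Decidable (Pre_count_frogs_between_stones s startIndex endIndex) := by unfold Pre_count_frogs_between_stones; infer_instance

def pvWitness_count_frogs_between_stones : String × List Int × List Int := ("|*|*|", [1, 2], [5, 4])

def Spec_count_frogs_between_stones (s : String) (startIndex : List Int) (endIndex : List Int) (out : List Int) : Prop := out = count_frogs_between_stones_alt s startIndex endIndex
instance (s : String) (startIndex : List Int) (endIndex : List Int) (out : List Int) : Decidable (Spec_count_frogs_between_stones s startIndex endIndex out) := by unfold Spec_count_frogs_between_stones; infer_instance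

-- ===== CLAIM (what is proved, stated in full; the proofs are below) =====
def Claim_equal_count_frogs_between_stones : Prop := ∀ (s : String) (startIndex : List Int) (endIndex : List Int), Dom_count_frogs_between_stones s startIndex endIndex → Pre_count_frogs_between_stones s startIndex endIndex → Spec_count_frogs_between_stones s startIndex endIndex (count_frogs_between_stones s startIndex endIndex)

-- ===== LEMMAS AND PROOFS =====

-- recursive specifications of A's three arrays
def pvPF : List Char → Int → List Int
  | [], _ => []
  | c :: t, cnt => (cnt + (if c = '*' then 1 else 0)) :: pvPF t (cnt + (if c = '*' then 1 else 0))

def pvLS : List Char → Int → Int → List Int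
  | [], _, _ => []
  | c :: t, i, last => (if c = '|' then i else last) :: pvLS t (i + 1) (if c = '|' then i else last)

def pvRS : List Char → Int → Int → List Int
  | [], _, _ => []
  | c :: t, i, last =>
    let r := pvRS t (i + 1) last
    (if c = '|' then i else r.headD last) :: r

-- index of the first / last '|' in a list
def pvFirstBar : List Char → Option Nat
  | [] => none
  | c :: t => if c = '|' then some 0 else (pvFirstBar t).map (· + 1)

def pvLastBar : List Char → Option Nat
  | [] => none
  | c :: t =>
    match pvLastBar t with
    | some m => some (m + 1)
    | none => if c = '|' then some 0 else none

-- the value A appends for one query whose normalized 0-based indices are st and en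
def pvElemA (cs : List Char) (st en : Nat) : Int :=
  let lb : Int := (pvFirstBar (cs.drop st)).elim (-1) (fun m => ((st + m : Nat) : Int))
  let rb : Int := (pvLastBar (cs.take (en + 1))).elim (-1) (fun m => (m : Int))
  if lb ≠ -1 ∧ rb ≠ -1 ∧ lb < rb
  then (((cs.take (rb + 1).toNat).count '*' : Nat) : Int) - (((cs.take (lb + 1).toNat).count '*' : Nat) : Int)
  else 0

-- the value B computes for one query with the same normalized indices
def pvElemB (cs : List Char) (st en : Nat) : Int :=
  let inner := (pvStones cs).filter (fun i => decide ((st : Int) ≤ i) && decide (i ≤ (en : Int)))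
  if inner.length < 2 then 0
  else (((pvFrogs cs).filter (fun f => decide (inner.headD 0 < f) && decide (f < inner.getLastD 0))).length : Int)

-- Python's xs[i] for an index in [-len, len): the normalized Nat position
def pvNrm (n : Nat) (i : Int) : Nat := if i < 0 then n - (-i).toNat else i.toNat

lemma pvPyGet?_inrange {α : Type} (xs : List α) (n : Nat) (i : Int) (hlen : xs.length = n)
    (h1 : -(n : Int) ≤ i) (h2 : i < (n : Int)) :
    PySem.List.pyGet? xs i = xs[pvNrm n i]? := by
  subst hlen
  simp only [PySem.List.pyGet?, PySem.List.pyIdx?, pvNrm]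
  split_ifs <;> first | rfl | omega | (exfalso; omega)

lemma pvLoop1_eq (cs : List Char) (i last cnt : Int) (pf ls : List Int) :
    pvLoop1 cs i last cnt pf ls = (pf ++ pvPF cs cnt, ls ++ pvLS cs i last) := by
  induction cs generalizing i last cnt pf ls with
  | nil => simp [pvLoop1, pvPF, pvLS]
  | cons c t ih => simp [pvLoop1, pvPF, pvLS, ih]

lemma pvPF_get (cs : List Char) (cnt : Int) (j : Nat) (h : j < cs.length) :
    (pvPF cs cnt)[j]? = some (cnt + (((cs.take (j + 1)).count '*' : Nat) : Int)) := by
  induction cs generalizing cnt j with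
  | nil => simp at h
  | cons c t ih =>
    cases j with
    | zero =>
      simp only [pvPF, List.getElem?_cons_zero, List.take_succ_cons, List.take_zero,
        List.count_cons, List.count_nil]
      by_cases hc : c = '*' <;> simp [hc]
    | succ k =>
      simp only [pvPF, List.getElem?_cons_succ, List.take_succ_cons, List.count_cons]
      rw [ih _ k (by simpa using h)]
      by_cases hc : c = '*' <;> simp [hc] <;> ring

lemma pvLS_get (cs : List Char) (i last : Int) (k : Nat) (h : k < cs.length) :
    (pvLS cs i last)[k]? = some ((pvLastBar (cs.take (k + 1))).elim last (fun m => i + (m : Int))) := by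
  induction cs generalizing i last k with
  | nil => simp at h
  | cons c t ih =>
    cases k with
    | zero =>
      simp only [List.take_succ_cons, List.take_zero, pvLS, List.getElem?_cons_zero, pvLastBar]
      by_cases hc : c = '|' <;> simp [hc]
    | succ k =>
      simp only [pvLS, List.getElem?_cons_succ, List.take_succ_cons]
      rw [ih _ _ k (by simpa using h)]
      simp only [pvLastBar]
      cases hlb : pvLastBar (t.take (k + 1)) with
      | some m =>
        simp only [Option.elim_some]
        push_cast
        ring
      | none => by_cases hc : c = '|' <;> simp [hc]

lemma pvLS_length (cs : List Char) (i last : Int) : (pvLS cs i last).length = cs.length := by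
  induction cs generalizing i last with
  | nil => simp [pvLS]
  | cons c t ih => simp [pvLS, ih]

lemma pvRS_length (cs : List Char) (i last : Int) : (pvRS cs i last).length = cs.length := by
  induction cs generalizing i with
  | nil => simp [pvRS]
  | cons c t ih => simp [pvRS, ih]

lemma pvRS_get (cs : List Char) (i last : Int) (k : Nat) (h : k < cs.length) :
    (pvRS cs i last)[k]? = some ((pvFirstBar (cs.drop k)).elim last (fun m => i + ((k + m : Nat) : Int))) := by
  induction cs generalizing i k with
  | nil => simp at h
  | cons c t ih =>
    cases k with
    | zero =>
      simp only [List.drop_zero, pvRS, List.getElem?_cons_zero, pvFirstBar]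
      by_cases hc : c = '|'
      · simp [hc]
      · simp only [hc, if_false]
        cases t with
        | nil => simp [pvRS, pvFirstBar]
        | cons d u =>
          have h0 := ih (i + 1) 0 (by simp)
          simp only [List.drop_zero] at h0
          have hh : (pvRS (d :: u) (i + 1) last).headD last
              = (pvFirstBar (d :: u)).elim last (fun m => i + 1 + ((0 + m : Nat) : Int)) := by
            rw [List.headD_eq_head?, List.head?_eq_getElem?, h0]; rfl
          rw [hh]
          cases hfb : pvFirstBar (d :: u) with
          | some m =>
            simp only [hfb, Option.map_some, Option.elim_some, Option.some.injEq]
            push_cast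
            ring
          | none => simp [hfb]
    | succ k =>
      simp only [pvRS, List.getElem?_cons_succ, List.drop_succ_cons]
      rw [ih (i + 1) k (by simpa using h)]
      cases hfb : pvFirstBar (t.drop k) with
      | some m =>
        simp only [Option.elim_some, Option.some.injEq]
        push_cast
        ring
      | none => simp

lemma pvHeadD_append_singleton {α : Type} (l : List α) (x d : α) : (l ++ [x]).headD d = l.headD x := by
  cases l <;> simp

lemma pvRS_append_singleton (ds : List Char) (c : Char) (i last : Int) :
    pvRS (ds ++ [c]) i last = pvRS ds i (if c = '|' then i + ds.length else last) ++ [if c = '|' then i + ds.length else last] := by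
  induction ds generalizing i with
  | nil => by_cases hc : c = '|' <;> simp [pvRS, hc]
  | cons d t ih =>
    simp only [List.cons_append, pvRS, ih (i + 1), List.length_cons]
    have harith : i + 1 + (t.length : Int) = i + ((t.length : Int) + 1) := by ring
    rw [harith]
    rw [pvHeadD_append_singleton]
    simp

lemma pvLoop2_eq (u : List Char) (i last : Int) (rs : List Int) :
    pvLoop2 u.reverse (i + u.length - 1) last rs = pvRS u i last ++ rs := by
  induction u using List.reverseRecOn generalizing last rs with
  | nil => simp [pvLoop2, pvRS]
  | append_singleton ds c ih =>
    rw [List.reverse_append]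
    simp only [List.reverse_cons, List.reverse_nil, List.nil_append, List.singleton_append,
      List.length_append, List.length_cons, List.length_nil]
    show pvLoop2 (c :: ds.reverse) _ last rs = _
    rw [pvLoop2]
    have hn : (((ds.length + (0 + 1) : Nat)) : Int) = (ds.length : Int) + 1 := by push_cast; ring
    rw [hn]
    have harith : i + ((ds.length : Int) + 1) - 1 - 1 = i + (ds.length : Int) - 1 := by ring
    have harith2 : i + ((ds.length : Int) + 1) - 1 = i + (ds.length : Int) := by ring
    rw [harith, harith2]
    rw [ih]
    rw [pvRS_append_singleton]
    simp

lemma pvFirstBar_some (u : List Char) (m : Nat) (h : pvFirstBar u = some m) :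
    m < u.length ∧ u[m]? = some '|' ∧ ∀ j < m, u[j]? ≠ some '|' := by
  induction u generalizing m with
  | nil => simp [pvFirstBar] at h
  | cons c t ih =>
    by_cases hc : c = '|'
    · simp [pvFirstBar, hc] at h
      subst h
      simp [hc]
    · simp only [pvFirstBar, hc, if_false, Option.map_eq_some_iff] at h
      obtain ⟨m', hm', rfl⟩ := h
      obtain ⟨h1, h2, h3⟩ := ih m' hm'
      refine ⟨by simpa using h1, by simpa using h2, ?_⟩
      intro j hj
      cases j with
      | zero => simpa using hc
      | succ k => simpa using h3 k (by omega)

lemma pvFirstBar_isSome (u : List Char) (j : Nat) (h : u[j]? = some '|') :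
    ∃ m, pvFirstBar u = some m ∧ m ≤ j := by
  induction u generalizing j with
  | nil => simp at h
  | cons c t ih =>
    by_cases hc : c = '|'
    · exact ⟨0, by simp [pvFirstBar, hc], by omega⟩
    · cases j with
      | zero => simp at h; exact absurd h hc
      | succ k =>
        obtain ⟨m, hm, hle⟩ := ih k (by simpa using h)
        exact ⟨m + 1, by simp [pvFirstBar, hc, hm], by omega⟩

lemma pvLastBar_none (u : List Char) (h : pvLastBar u = none) : ∀ j : Nat, u[j]? ≠ some '|' := by
  induction u with
  | nil => simp
  | cons c t ih =>
    intro j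
    unfold pvLastBar at h
    cases hlb : pvLastBar t with
    | some m => simp [hlb] at h
    | none =>
      rw [hlb] at h
      have hc : c ≠ '|' := by by_contra hcc; simp [hcc] at h
      cases j with
      | zero => simpa using hc
      | succ k => simpa using ih hlb k

lemma pvLastBar_some (u : List Char) (m : Nat) (h : pvLastBar u = some m) :
    m < u.length ∧ u[m]? = some '|' ∧ ∀ j, m < j → u[j]? ≠ some '|' := by
  induction u generalizing m with
  | nil => simp [pvLastBar] at h
  | cons c t ih =>
    unfold pvLastBar at h
    cases hlb : pvLastBar t with
    | some m' =>
      rw [hlb] at h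
      obtain rfl : m = m' + 1 := by simpa using h.symm
      obtain ⟨h1, h2, h3⟩ := ih m' hlb
      refine ⟨by simpa using h1, by simpa using h2, ?_⟩
      intro j hj
      cases j with
      | zero => omega
      | succ k => simpa using h3 k (by omega)
    | none =>
      rw [hlb] at h
      have hc : c = '|' := by by_contra hcc; simp [hcc] at h
      obtain rfl : m = 0 := by simp [hc] at h; omega
      refine ⟨by simp, by simp [hc], ?_⟩
      intro j hj
      cases j with
      | zero => omega
      | succ k => simpa using pvLastBar_none t hlb k

lemma pvLastBar_isSome (u : List Char) (j : Nat) (h : u[j]? = some '|') :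
    ∃ m, pvLastBar u = some m ∧ j ≤ m := by
  induction u generalizing j with
  | nil => simp at h
  | cons c t ih =>
    cases hlb : pvLastBar t with
    | some m => exact ⟨m + 1, by simp [pvLastBar, hlb], by
        cases j with
        | zero => omega
        | succ k =>
          obtain ⟨m', hm', hle⟩ := ih k (by simpa using h)
          rw [hm'] at hlb
          obtain rfl : m = m' := by simpa using hlb.symm
          omega⟩
    | none =>
      cases j with
      | zero =>
        have hc : c = '|' := by simpa using h
        exact ⟨0, by simp [pvLastBar, hlb, hc], by omega⟩
      | succ k =>
        obtain ⟨m', hm', _⟩ := ih k (by simpa using h)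
        rw [hm'] at hlb
        simp at hlb

lemma pvStones_mem (cs : List Char) (x : Int) :
    x ∈ pvStones cs ↔ ∃ k : Nat, k < cs.length ∧ cs[k]? = some '|' ∧ x = (k : Int) := by
  unfold pvStones
  simp only [List.mem_map, List.mem_filter, PySem.List.mem_enumerate_iff]
  constructor
  · rintro ⟨p, ⟨⟨k, hk, rfl⟩, hbar⟩, rfl⟩
    exact ⟨k, hk, by simp_all [List.getElem?_eq_getElem], by simp⟩
  · rintro ⟨k, hk, hbar, rfl⟩
    refine ⟨(k, '|'), ⟨⟨k, hk, ?_⟩, by simp⟩, by simp⟩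
    have : cs[k] = '|' := by simpa [List.getElem?_eq_getElem hk] using hbar
    simp [this]

lemma pvStones_sorted (cs : List Char) : (pvStones cs).Pairwise (· < ·) := by
  unfold pvStones
  exact List.pairwise_map.2 ((PySem.List.pairwise_lt_enumerate cs 0).filter _)

lemma pvFrogs_mem (cs : List Char) (x : Int) :
    x ∈ pvFrogs cs ↔ ∃ k : Nat, k < cs.length ∧ cs[k]? = some '*' ∧ x = (k : Int) := by
  unfold pvFrogs
  simp only [List.mem_map, List.mem_filter, PySem.List.mem_enumerate_iff]
  constructor
  · rintro ⟨p, ⟨⟨k, hk, rfl⟩, hstar⟩, rfl⟩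
    exact ⟨k, hk, by simp_all [List.getElem?_eq_getElem], by simp⟩
  · rintro ⟨k, hk, hstar, rfl⟩
    refine ⟨(k, '*'), ⟨⟨k, hk, ?_⟩, by simp⟩, by simp⟩
    have : cs[k] = '*' := by simpa [List.getElem?_eq_getElem hk] using hstar
    simp [this]

lemma pvFrogs_count (cs : List Char) (j : Nat) :
    ((pvFrogs cs).countP (fun f => decide (f < (j : Int)))) = (cs.take j).count '*' := by
  have aux : ∀ (t : List Char) (s j : Nat),
      ((((PySem.List.enumerate t ((s : Nat) : Int)).filter (fun p => p.2 == '*')).map (fun p => p.1)).countP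
        (fun f => decide (f < (((s + j : Nat) : Nat) : Int)))) = (t.take j).count '*' := by
    intro t
    induction t with
    | nil => intro s j; simp [PySem.List.enumerate_nil]
    | cons c u ih =>
      intro s j
      have hzero : ∀ (v : List Char) (s' : Nat),
          ((((PySem.List.enumerate v ((s' : Nat) : Int)).filter (fun p => p.2 == '*')).map (fun p => p.1)).countP
            (fun f => decide (f < ((s' : Nat) : Int)))) = 0 := by
        intro v s'
        rw [List.countP_eq_zero]
        intro a ha
        rw [List.mem_map] at ha
        obtain ⟨p, hpf, rfl⟩ := ha
        rw [List.mem_filter] at hpf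
        have hp := hpf.1
        rw [PySem.List.mem_enumerate_iff] at hp
        obtain ⟨k, hk, rfl⟩ := hp
        simp
      have hcast : ((s : Nat) : Int) + 1 = (((s + 1 : Nat) : Nat) : Int) := by push_cast; ring
      cases j with
      | zero => simpa using hzero (c :: u) s
      | succ k =>
        rw [PySem.List.enumerate_cons]
        by_cases hc : c = '*'
        · simp only [List.filter_cons, hc, beq_self_eq_true, if_true, List.map_cons,
            List.countP_cons, List.take_succ_cons, List.count_cons]
          rw [hcast]
          have := ih (s + 1) k
          have hc2 : (((s + 1 + k : Nat) : Nat) : Int) = (((s + (k + 1) : Nat) : Nat) : Int) := by push_cast; ring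
          rw [hc2] at this
          rw [this]
          have hd : decide ((s : Int) < ((s + (k + 1) : Nat) : Int)) = true := by
            simp only [decide_eq_true_eq]
            push_cast
            omega
          rw [hd]
          simp [Nat.add_comm]
        · simp only [List.filter_cons, List.take_succ_cons, List.count_cons]
          have hbeq : (c == '*') = false := by simpa using hc
          rw [hbeq]
          simp only [if_false, Bool.false_eq_true]
          rw [hcast]
          have := ih (s + 1) k
          have hc2 : (((s + 1 + k : Nat) : Nat) : Int) = (((s + (k + 1) : Nat) : Nat) : Int) := by push_cast; ring
          rw [hc2] at this
          rw [this]
          simp [hbeq]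
  have := aux cs 0 j
  simpa [pvFrogs] using this

lemma pvCountP_split (l : List Int) (x y : Int) (h : x ≤ y) :
    l.countP (fun f => decide (f < y)) =
      l.countP (fun f => decide (f < x)) + l.countP (fun f => decide (x ≤ f) && decide (f < y)) := by
  induction l with
  | nil => simp
  | cons a t ih =>
    simp only [List.countP_cons, ih]
    by_cases h1 : a < x <;> by_cases h2 : a < y <;> by_cases h3 : x ≤ a <;>
      simp [h1, h2, h3] <;> omega

lemma pvHeadD_mem {α : Type} {l : List α} (h : l ≠ []) (d : α) : l.headD d ∈ l := by
  cases l with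
  | nil => exact absurd rfl h
  | cons a t => simp

lemma pvGetLastD_mem {α : Type} {l : List α} (h : l ≠ []) (d : α) : l.getLastD d ∈ l := by
  induction l generalizing d with
  | nil => exact absurd rfl h
  | cons a t ih =>
    rw [List.getLastD_cons]
    cases t with
    | nil => simp
    | cons b u => exact List.mem_cons_of_mem _ (ih (by simp) a)

lemma pvHeadD_min {l : List Int} (h : l.Pairwise (· < ·)) {x : Int} (hx : x ∈ l) (d : Int) :
    l.headD d ≤ x := by
  cases l with
  | nil => simp at hx
  | cons a t =>
    rcases List.mem_cons.1 hx with rfl | hxt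
    · simp
    · simpa using le_of_lt (List.rel_of_pairwise_cons h hxt)

lemma pvGetLastD_max {l : List Int} (h : l.Pairwise (· < ·)) {x : Int} (hx : x ∈ l) (d : Int) :
    x ≤ l.getLastD d := by
  induction l generalizing d with
  | nil => simp at hx
  | cons a t ih =>
    rw [List.getLastD_cons]
    rcases List.mem_cons.1 hx with rfl | hxt
    · cases t with
      | nil => simp
      | cons b u => exact le_of_lt (List.rel_of_pairwise_cons h (pvGetLastD_mem (by simp) x))
    · exact ih h.tail hxt _

lemma pvTwo_le_length {l : List Int} {x y : Int} (hx : x ∈ l) (hy : y ∈ l) (hne : x ≠ y) :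
    2 ≤ l.length := by
  cases l with
  | nil => simp at hx
  | cons a t =>
    cases t with
    | nil => simp_all
    | cons b u => simp

lemma pvHeadD_lt_getLastD {l : List Int} (h : l.Pairwise (· < ·)) (hlen : 2 ≤ l.length) (d : Int) :
    l.headD d < l.getLastD d := by
  cases l with
  | nil => simp at hlen
  | cons a t =>
    cases t with
    | nil => simp at hlen
    | cons b u =>
      rw [List.getLastD_cons]
      exact List.rel_of_pairwise_cons h (pvGetLastD_mem (by simp) a)

-- the heart: per-query agreement of the two ports
lemma pvElem_eq (cs : List Char) (st en : Nat)
    (hst : st < cs.length) (hen : en < cs.length) :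
    pvElemA cs st en = pvElemB cs st en := by
  have hmem : ∀ x : Int,
      (x ∈ (pvStones cs).filter (fun i => decide ((st : Int) ≤ i) && decide (i ≤ (en : Int))))
        ↔ ∃ k : Nat, k < cs.length ∧ cs[k]? = some '|' ∧ st ≤ k ∧ k ≤ en ∧ x = (k : Int) := by
    intro x
    rw [List.mem_filter, pvStones_mem]
    constructor
    · rintro ⟨⟨k, hk, hbar, rfl⟩, hcond⟩
      simp only [Bool.and_eq_true, decide_eq_true_eq] at hcond
      exact ⟨k, hk, hbar, by omega, by omega, rfl⟩
    · rintro ⟨k, hk, hbar, h1, h2, rfl⟩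
      refine ⟨⟨k, hk, hbar, rfl⟩, ?_⟩
      simp only [Bool.and_eq_true, decide_eq_true_eq]
      omega
  have hsorted : ((pvStones cs).filter (fun i => decide ((st : Int) ≤ i) && decide (i ≤ (en : Int)))).Pairwise (· < ·) :=
    (pvStones_sorted cs).filter _
  cases hfb : pvFirstBar (cs.drop st) with
  | none =>
    have hempty : (pvStones cs).filter (fun i => decide ((st : Int) ≤ i) && decide (i ≤ (en : Int))) = [] := by
      rw [List.eq_nil_iff_forall_not_mem]
      intro x hx
      obtain ⟨k, hk, hbar, hk1, hk2, rfl⟩ := (hmem x).1 hx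
      have hdrop : (cs.drop st)[k - st]? = some '|' := by
        rw [List.getElem?_drop]
        have heq : st + (k - st) = k := by omega
        rw [heq]
        exact hbar
      obtain ⟨mm, hmm, _⟩ := pvFirstBar_isSome _ _ hdrop
      rw [hfb] at hmm
      cases hmm
    simp only [pvElemA, pvElemB, hfb, Option.elim_none, hempty]
    rw [if_neg (by simp), if_pos (by simp)]
  | some m =>
    cases hlbar : pvLastBar (cs.take (en + 1)) with
    | none =>
      have hempty : (pvStones cs).filter (fun i => decide ((st : Int) ≤ i) && decide (i ≤ (en : Int))) = [] := by
        rw [List.eq_nil_iff_forall_not_mem]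
        intro x hx
        obtain ⟨k, hk, hbar, hk1, hk2, rfl⟩ := (hmem x).1 hx
        have htake : (cs.take (en + 1))[k]? = some '|' := by
          rw [List.getElem?_take_of_lt (by omega)]
          exact hbar
        obtain ⟨mm, hmm, _⟩ := pvLastBar_isSome _ _ htake
        rw [hlbar] at hmm
        cases hmm
      simp only [pvElemA, pvElemB, hfb, hlbar, Option.elim_none, Option.elim_some, hempty]
      rw [if_neg (by simp), if_pos (by simp)]
    | some m' =>
      obtain ⟨hfb1, hfb2, hfb3⟩ := pvFirstBar_some _ _ hfb
      obtain ⟨hlb1, hlb2, hlb3⟩ := pvLastBar_some _ _ hlbar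
      rw [List.length_drop] at hfb1
      rw [List.length_take] at hlb1
      have hLbar : cs[st + m]? = some '|' := by
        rw [List.getElem?_drop] at hfb2
        exact hfb2
      have hRbar : cs[m']? = some '|' := by
        rw [List.getElem?_take_of_lt (by omega)] at hlb2
        exact hlb2
      have hRen : m' ≤ en := by omega
      have hLmin : ∀ k : Nat, cs[k]? = some '|' → st ≤ k → st + m ≤ k := by
        intro k hbar hk
        by_contra hcc
        push_neg at hcc
        apply hfb3 (k - st) (by omega)
        rw [List.getElem?_drop]
        have heq : st + (k - st) = k := by omega
        rw [heq]
        exact hbar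
      have hRmax : ∀ k : Nat, cs[k]? = some '|' → k ≤ en → k ≤ m' := by
        intro k hbar hk
        by_contra hcc
        push_neg at hcc
        apply hlb3 k (by omega)
        rw [List.getElem?_take_of_lt (by omega)]
        exact hbar
      have hLn : st + m < cs.length := by omega
      by_cases hLR : st + m < m'
      · -- both bounding stones are inside the range: the branch fires on both sides
        have hLmem : ((st + m : Nat) : Int) ∈
            (pvStones cs).filter (fun i => decide ((st : Int) ≤ i) && decide (i ≤ (en : Int))) :=
          (hmem _).2 ⟨st + m, by omega, hLbar, by omega, by omega, rfl⟩
        have hRmem : ((m' : Nat) : Int) ∈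
            (pvStones cs).filter (fun i => decide ((st : Int) ≤ i) && decide (i ≤ (en : Int))) :=
          (hmem _).2 ⟨m', by omega, hRbar, by omega, by omega, rfl⟩
        have h2len : 2 ≤ ((pvStones cs).filter (fun i => decide ((st : Int) ≤ i) && decide (i ≤ (en : Int)))).length :=
          pvTwo_le_length hLmem hRmem (by omega)
        have hne : (pvStones cs).filter (fun i => decide ((st : Int) ≤ i) && decide (i ≤ (en : Int))) ≠ [] := by
          intro hcc
          rw [hcc] at h2len
          simp at h2len
        have hhead : ((pvStones cs).filter (fun i => decide ((st : Int) ≤ i) && decide (i ≤ (en : Int)))).headD 0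
            = ((st + m : Nat) : Int) := by
          obtain ⟨k1, hk1, hbar1, hs1, he1, hx1⟩ := (hmem _).1 (pvHeadD_mem hne 0)
          have h1 := pvHeadD_min hsorted hLmem 0
          have h2 := hLmin k1 hbar1 hs1
          omega
        have hlast : ((pvStones cs).filter (fun i => decide ((st : Int) ≤ i) && decide (i ≤ (en : Int)))).getLastD 0
            = ((m' : Nat) : Int) := by
          obtain ⟨k2, hk2, hbar2, hs2, he2, hx2⟩ := (hmem _).1 (pvGetLastD_mem hne 0)
          have h1 := pvGetLastD_max hsorted hRmem 0
          have h2 := hRmax k2 hbar2 he2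
          omega
        simp only [pvElemA, pvElemB, hfb, hlbar, Option.elim_some]
        rw [if_pos ⟨by omega, by omega, by omega⟩, if_neg (by omega), hhead, hlast]
        have ht1 : ((m' : Int) + 1).toNat = m' + 1 := by omega
        have ht2 : (((st + m : Nat) : Int) + 1).toNat = st + m + 1 := by omega
        rw [ht1, ht2]
        rw [← pvFrogs_count cs (m' + 1), ← pvFrogs_count cs (st + m + 1)]
        rw [pvCountP_split (pvFrogs cs) ((st + m + 1 : Nat) : Int) ((m' + 1 : Nat) : Int) (by push_cast; omega)]
        have hcongr : (pvFrogs cs).countP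
              (fun f => decide (((st + m + 1 : Nat) : Int) ≤ f) && decide (f < ((m' + 1 : Nat) : Int)))
            = (pvFrogs cs).countP
              (fun f => decide (((st + m : Nat) : Int) < f) && decide (f < ((m' : Nat) : Int))) := by
          apply List.countP_congr
          intro x hx
          obtain ⟨k, hk, hstar, rfl⟩ := (pvFrogs_mem cs x).1 hx
          have hkne : k ≠ m' := by
            intro hkk
            rw [hkk, hRbar] at hstar
            simp at hstar
          simp only [Bool.and_eq_true, decide_eq_true_eq]
          push_cast
          omega
        rw [hcongr]
        push_cast
        simp only [List.countP_eq_length_filter]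
        ring
      · -- no two stones in range: both sides give 0
        have hlen2 : ((pvStones cs).filter (fun i => decide ((st : Int) ≤ i) && decide (i ≤ (en : Int)))).length < 2 := by
          by_contra hcc
          push_neg at hcc
          have hne : (pvStones cs).filter (fun i => decide ((st : Int) ≤ i) && decide (i ≤ (en : Int))) ≠ [] := by
            intro h0
            rw [h0] at hcc
            simp at hcc
          have hlt := pvHeadD_lt_getLastD hsorted hcc 0
          obtain ⟨k1, hk1, hbar1, hs1, he1, hx1⟩ := (hmem _).1 (pvHeadD_mem hne 0)
          obtain ⟨k2, hk2, hbar2, hs2, he2, hx2⟩ := (hmem _).1 (pvGetLastD_mem hne 0)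
          have h1 := hLmin k1 hbar1 hs1
          have h2 := hRmax k2 hbar2 he2
          omega
        simp only [pvElemA, pvElemB, hfb, hlbar, Option.elim_some]
        rw [if_neg (by rintro ⟨-, -, hcc⟩; omega), if_pos hlen2]

lemma pvLoops_eq (cs : List Char) (qs : List (Int × Int)) (acc : List Int)
    (hq : ∀ p ∈ qs, 1 ≤ p.1 ∧ p.1 ≤ (cs.length : Int) ∧ 1 ≤ p.2 ∧ p.2 ≤ (cs.length : Int)) :
    pvQueryLoop ([0] ++ pvPF cs 0) (pvLS cs 0 (-1)) (pvRS cs 0 (-1)) qs acc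
      = (pvQueryB (pvStones cs) (pvFrogs cs) (cs.length : Int) qs).map (fun t => acc ++ t) := by
  induction qs generalizing acc with
  | nil => simp [pvQueryLoop, pvQueryB]
  | cons q rest ih =>
    obtain ⟨a, b⟩ := q
    obtain ⟨ha1, ha2, hb1, hb2⟩ := hq (a, b) (List.mem_cons_self)
    simp only at ha1 ha2 hb1 hb2
    set k1 := (a - 1).toNat with hk1def
    set k2 := (b - 1).toNat with hk2def
    have hk1c : ((k1 : Nat) : Int) = a - 1 := Int.toNat_of_nonneg (by omega)
    have hk2c : ((k2 : Nat) : Int) = b - 1 := Int.toNat_of_nonneg (by omega)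
    have hk1 : k1 < cs.length := by omega
    have hk2 : k2 < cs.length := by omega
    have hA1 : -((cs.length : Nat) : Int) ≤ a - 1 := by omega
    have hA2 : a - 1 < ((cs.length : Nat) : Int) := by omega
    have hB1 : -((cs.length : Nat) : Int) ≤ b - 1 := by omega
    have hB2 : b - 1 < ((cs.length : Nat) : Int) := by omega
    have hnrm1 : pvNrm cs.length (a - 1) = k1 := by
      unfold pvNrm
      rw [if_neg (by omega)]
    have hnrm2 : pvNrm cs.length (b - 1) = k2 := by
      unfold pvNrm
      rw [if_neg (by omega)]
    have hgA : PySem.List.pyGet? (pvRS cs 0 (-1)) (a - 1)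
        = some ((pvFirstBar (cs.drop k1)).elim (-1) (fun m => 0 + ((k1 + m : Nat) : Int))) := by
      rw [pvPyGet?_inrange _ cs.length _ (pvRS_length cs 0 (-1)) hA1 hA2, hnrm1]
      exact pvRS_get cs 0 (-1) k1 hk1
    have hgA2 : PySem.List.pyGet? (pvLS cs 0 (-1)) (b - 1)
        = some ((pvLastBar (cs.take (k2 + 1))).elim (-1) (fun m => 0 + (m : Int))) := by
      rw [pvPyGet?_inrange _ cs.length _ (pvLS_length cs 0 (-1)) hB1 hB2, hnrm2]
      exact pvLS_get cs 0 (-1) k2 hk2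
    simp only [pvQueryLoop, hgA, hgA2]
    rw [ih _ (fun p hp => hq p (List.mem_cons_of_mem _ hp))]
    have hval : (if ((pvFirstBar (cs.drop k1)).elim (-1) (fun m => 0 + ((k1 + m : Nat) : Int))) ≠ -1 ∧
          ((pvLastBar (cs.take (k2 + 1))).elim (-1) (fun m => 0 + (m : Int))) ≠ -1 ∧
          ((pvFirstBar (cs.drop k1)).elim (-1) (fun m => 0 + ((k1 + m : Nat) : Int))) <
            ((pvLastBar (cs.take (k2 + 1))).elim (-1) (fun m => 0 + (m : Int)))
        then PySem.List.pyGetD ([0] ++ pvPF cs 0)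
               (((pvLastBar (cs.take (k2 + 1))).elim (-1) (fun m => 0 + (m : Int))) + 1) 0 -
             PySem.List.pyGetD ([0] ++ pvPF cs 0)
               (((pvFirstBar (cs.drop k1)).elim (-1) (fun m => 0 + ((k1 + m : Nat) : Int))) + 1) 0
        else 0) = pvElemA cs k1 k2 := by
      cases hfb : pvFirstBar (cs.drop k1) with
      | none =>
        cases hlbar : pvLastBar (cs.take (k2 + 1)) with
        | none =>
          simp only [Option.elim_none]
          rw [if_neg (by simp)]
          simp only [pvElemA, hfb, hlbar, Option.elim_none]
          rw [if_neg (by simp)]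
        | some m' =>
          simp only [Option.elim_none, Option.elim_some]
          rw [if_neg (by simp)]
          simp only [pvElemA, hfb, hlbar, Option.elim_none, Option.elim_some]
          rw [if_neg (by simp)]
      | some m =>
        cases hlbar : pvLastBar (cs.take (k2 + 1)) with
        | none =>
          simp only [Option.elim_some, Option.elim_none]
          rw [if_neg (by simp)]
          simp only [pvElemA, hfb, hlbar, Option.elim_some, Option.elim_none]
          rw [if_neg (by simp)]
        | some m' =>
          have hmlt : k1 + m < cs.length := by
            have := (pvFirstBar_some _ _ hfb).1
            simp [List.length_drop] at this
            omega
          have hm'lt : m' < cs.length := by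
            have := (pvLastBar_some _ _ hlbar).1
            simp [List.length_take] at this
            omega
          simp only [Option.elim_some]
          have hGr : PySem.List.pyGetD ([0] ++ pvPF cs 0) (0 + (m' : Int) + 1) 0
              = (((cs.take (m' + 1)).count '*' : Nat) : Int) := by
            have hcast : (0 + (m' : Int) + 1) = ((m' + 1 : Nat) : Int) := by push_cast; ring
            rw [hcast]
            show PySem.List.pyGetD ((0 : Int) :: pvPF cs 0) _ _ = _
            rw [PySem.List.pyGetD_natCast, List.getD_eq_getElem?_getD]
            show ((0 : Int) :: pvPF cs 0)[_ + 1]?.getD 0 = _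
            rw [List.getElem?_cons_succ]
            rw [pvPF_get cs 0 m' hm'lt]
            simp
          have hGl : PySem.List.pyGetD ([0] ++ pvPF cs 0) (0 + ((k1 + m : Nat) : Int) + 1) 0
              = (((cs.take (k1 + m + 1)).count '*' : Nat) : Int) := by
            have hcast : (0 + ((k1 + m : Nat) : Int) + 1) = ((k1 + m + 1 : Nat) : Int) := by push_cast; ring
            rw [hcast]
            show PySem.List.pyGetD ((0 : Int) :: pvPF cs 0) _ _ = _
            rw [PySem.List.pyGetD_natCast, List.getD_eq_getElem?_getD]
            show ((0 : Int) :: pvPF cs 0)[_ + 1]?.getD 0 = _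
            rw [List.getElem?_cons_succ]
            rw [pvPF_get cs 0 _ hmlt]
            simp
          by_cases hlt : (((k1 + m : Nat)) : Int) < (m' : Int)
          · rw [if_pos ⟨by omega, by omega, by omega⟩]
            rw [hGr, hGl]
            simp only [pvElemA, hfb, hlbar, Option.elim_some]
            rw [if_pos ⟨by omega, by omega, by omega⟩]
            have h1 : ((m' : Int) + 1).toNat = m' + 1 := by omega
            have h2 : (((k1 + m : Nat) : Int) + 1).toNat = k1 + m + 1 := by omega
            rw [h1, h2]
          · rw [if_neg (by intro hcc; exact hlt (by omega))]
            simp only [pvElemA, hfb, hlbar, Option.elim_some]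
            rw [if_neg (by intro hcc; exact hlt (by omega))]
    rw [hval, pvElem_eq cs k1 k2 hk1 hk2]
    simp only [pvQueryB]
    rw [if_pos ⟨ha1, ha2, hb1, hb2⟩]
    rw [← hk1c, ← hk2c]
    cases pvQueryB (pvStones cs) (pvFrogs cs) (cs.length : Int) rest with
    | none => simp
    | some t => simp [pvElemB]

-- ===== VERDICT (by name: the statement is the Claim_ definition above) =====
theorem count_frogs_between_stones_spec : Claim_equal_count_frogs_between_stones := by
  intro s startIndex endIndex _ hpre
  unfold Spec_count_frogs_between_stones
  unfold count_frogs_between_stones count_frogs_between_stones_alt pvPreprocess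
  rw [pvLoop1_eq]
  have h2 := pvLoop2_eq s.toList 0 (-1)
  simp only [zero_add] at h2
  rw [h2]
  simp only [List.nil_append, List.append_nil]
  rw [pvLoops_eq _ _ _ hpre]
  cases pvQueryB (pvStones s.toList) (pvFrogs s.toList) (s.toList.length : Int) (startIndex.zip endIndex) with
  | none => simp
  | some t => simp
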